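-- pv_equiv track=rewrite | github.com/HCVincent/sword-coming-viz | scripts/build_swordcoming_offline_data.py | choose_summary_sentences
-- ===== SOURCE A (Python) =====
-- from typing import Any, Dict, Iterable, List, Optional, Sequence, Tuple
--
-- def choose_summary_sentences(
--     sentences: Sequence[str],
--     sentence_characters: Sequence[Sequence[str]],
--     sentence_locations: Sequence[Sequence[str]],
--     limit: int = 3,
-- ) -> List[str]:
--     prioritized: List[str] = []
--     fallback: List[str] = []
--
--     for sentence, characters, locations in zip(sentences, sentence_characters, sentence_locations):
--         if characters or locations:
--             prioritized.append(sentence)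
--         elif sentence:
--             fallback.append(sentence)
--
--     selected = prioritized[:limit]
--     if len(selected) < limit:
--         selected.extend(fallback[: limit - len(selected)])
--     return selected
-- ===== SOURCE B (Python) =====
-- def choose_summary_sentences(sentences, sentence_characters, sentence_locations, limit=3):
--     tagged = [
--         (0 if (characters or locations) else 1, sentence)
--         for sentence, characters, locations in zip(sentences, sentence_characters, sentence_locations)
--         if characters or locations or sentence
--     ]
--     tagged.sort(key=lambda item: item[0])
--     return [sentence for _, sentence in tagged[:limit]]
-- ===== Notes on version B (the rewrite author's own statement) =====
-- stated objective: alternative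
-- what changed: Replaces A's two-bucket partition (prioritized/fallback lists) followed by slice-and-extend merging with a single tagged collection: each kept sentence gets a 0/1 priority key, the one list is stably sorted by that key, and the first `limit` entries are returned.
-- outside the precondition, e.g. on choose_summary_sentences(['a', 'b'], [['x'], []], [[], []], -1): A returns [], B returns ['a']
import Mathlib
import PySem

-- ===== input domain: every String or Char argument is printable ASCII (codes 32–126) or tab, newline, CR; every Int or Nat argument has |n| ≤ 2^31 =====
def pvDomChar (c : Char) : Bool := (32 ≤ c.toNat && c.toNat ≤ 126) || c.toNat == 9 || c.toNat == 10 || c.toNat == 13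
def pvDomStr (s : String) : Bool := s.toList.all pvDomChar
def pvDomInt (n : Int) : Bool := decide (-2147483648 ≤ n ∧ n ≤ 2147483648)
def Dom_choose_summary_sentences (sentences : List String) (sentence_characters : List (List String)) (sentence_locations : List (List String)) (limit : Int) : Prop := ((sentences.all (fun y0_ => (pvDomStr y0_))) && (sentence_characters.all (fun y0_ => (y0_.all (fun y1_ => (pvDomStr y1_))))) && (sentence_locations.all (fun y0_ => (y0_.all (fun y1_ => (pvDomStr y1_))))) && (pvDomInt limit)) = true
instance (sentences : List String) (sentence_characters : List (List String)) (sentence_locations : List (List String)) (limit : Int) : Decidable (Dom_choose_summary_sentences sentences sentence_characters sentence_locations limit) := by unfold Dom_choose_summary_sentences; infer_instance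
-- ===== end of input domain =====

-- B replaces A's two-bucket partition-then-merge by tagging each kept sentence with a 0/1
-- priority, stably sorting the single tagged list by that key and slicing off the first
-- `limit` entries (objective: alternative decomposition, not faster).

-- ===== PORT A =====
def choose_summary_sentences (sentences : List String) (sentence_characters : List (List String)) (sentence_locations : List (List String)) (limit : Int) : List String :=
  let pf := (sentences.zip (sentence_characters.zip sentence_locations)).foldl
    (fun (acc : List String × List String) t =>
      if t.2.1 ≠ [] ∨ t.2.2 ≠ [] then (acc.1 ++ [t.1], acc.2)
      else if t.1 ≠ "" then (acc.1, acc.2 ++ [t.1])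
      else acc)
    ([], [])
  let selected := PySem.List.slice pf.1 none (some limit)
  if (selected.length : Int) < limit then
    selected ++ PySem.List.slice pf.2 none (some (limit - (selected.length : Int)))
  else selected

-- ===== PORT B =====
def choose_summary_sentences_alt (sentences : List String) (sentence_characters : List (List String)) (sentence_locations : List (List String)) (limit : Int) : List String :=
  let tagged := ((sentences.zip (sentence_characters.zip sentence_locations)).filter
      (fun t => decide (t.2.1 ≠ [] ∨ t.2.2 ≠ [] ∨ t.1 ≠ ""))).map
      (fun t => ((if t.2.1 ≠ [] ∨ t.2.2 ≠ [] then (0 : Int) else 1), t.1))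
  let sortedTagged := PySem.List.sorted tagged (fun item => item.1) false
  (PySem.List.slice sortedTagged none (some limit)).map (fun item => item.2)

-- ===== PRECONDITION & SPEC =====
-- Pre_ restricts `limit` (a requested count of sentences) to the natural domain 0 ≤ limit:
-- on a negative limit A still returns (the Python slice prioritized[:limit], an accident of
-- negative-slice semantics that drops the last |limit| prioritized sentences and ignores the
-- fallback), which no caller of a "select up to limit sentences" helper relies on, and B's
-- natural slice of the merged list differs there.
def Pre_choose_summary_sentences (sentences : List String) (sentence_characters : List (List String)) (sentence_locations : List (List String)) (limit : Int) : Prop :=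
  0 ≤ limit
instance (sentences : List String) (sentence_characters : List (List String)) (sentence_locations : List (List String)) (limit : Int) : Decidable (Pre_choose_summary_sentences sentences sentence_characters sentence_locations limit) := by unfold Pre_choose_summary_sentences; infer_instance

def pvWitness_choose_summary_sentences : List String × List (List String) × List (List String) × Int :=
  (["a", "b"], [["x"], []], [[], []], 1)

def Spec_choose_summary_sentences (sentences : List String) (sentence_characters : List (List String)) (sentence_locations : List (List String)) (limit : Int) (out : List String) : Prop := out = choose_summary_sentences_alt sentences sentence_characters sentence_locations limit
instance (sentences : List String) (sentence_characters : List (List String)) (sentence_locations : List (List String)) (limit : Int) (out : List String) : Decidable (Spec_choose_summary_sentences sentences sentence_characters sentence_locations limit out) := by unfold Spec_choose_summary_sentences; infer_instance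

-- ===== CLAIM =====
def Claim_equal_choose_summary_sentences : Prop := ∀ (sentences : List String) (sentence_characters : List (List String)) (sentence_locations : List (List String)) (limit : Int), Dom_choose_summary_sentences sentences sentence_characters sentence_locations limit → Pre_choose_summary_sentences sentences sentence_characters sentence_locations limit → Spec_choose_summary_sentences sentences sentence_characters sentence_locations limit (choose_summary_sentences sentences sentence_characters sentence_locations limit)

-- ===== LEMMAS AND PROOFS =====

-- the prioritized / fallback projections of the zipped input
def pvPrio (zs : List (String × List String × List String)) : List String :=
  (zs.filter (fun t => decide (t.2.1 ≠ [] ∨ t.2.2 ≠ []))).map (fun t => t.1)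
def pvFall (zs : List (String × List String × List String)) : List String :=
  (zs.filter (fun t => decide (¬(t.2.1 ≠ [] ∨ t.2.2 ≠ []) ∧ t.1 ≠ ""))).map (fun t => t.1)
def pvTag (t : String × List String × List String) : Int × String :=
  ((if t.2.1 ≠ [] ∨ t.2.2 ≠ [] then (0 : Int) else 1), t.1)

lemma pv_loop (zs : List (String × List String × List String)) (a b : List String) :
    zs.foldl
      (fun (acc : List String × List String) t =>
        if t.2.1 ≠ [] ∨ t.2.2 ≠ [] then (acc.1 ++ [t.1], acc.2)
        else if t.1 ≠ "" then (acc.1, acc.2 ++ [t.1])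
        else acc) (a, b)
      = (a ++ pvPrio zs, b ++ pvFall zs) := by
  induction zs generalizing a b with
  | nil => simp [pvPrio, pvFall]
  | cons t zs ih =>
    by_cases hp : t.2.1 ≠ [] ∨ t.2.2 ≠ []
    · simp only [List.foldl_cons, if_pos hp, ih, pvPrio, pvFall, List.filter_cons]
      simp [hp]
    · by_cases hs : t.1 ≠ ""
      · simp only [List.foldl_cons, if_neg hp, if_pos hs, ih, pvPrio, pvFall, List.filter_cons]
        simp [hp, hs]
      · simp only [List.foldl_cons, if_neg hp, if_neg hs, ih, pvPrio, pvFall, List.filter_cons]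
        simp [hp, hs]

lemma pv_insertBy_zero (x : Int × String) (A B : List (Int × String))
    (hA : ∀ a ∈ A, a.1 = 0) (hB : ∀ b ∈ B, b.1 = 1) (hx : x.1 = 0) :
    PySem.List.insertBy (fun a b => decide (a.1 < b.1)) x (A ++ B) = A ++ x :: B := by
  induction A with
  | nil =>
    cases B with
    | nil => simp [PySem.List.insertBy]
    | cons b B' =>
      have hb := hB b (by simp)
      simp [PySem.List.insertBy, hx, hb]
  | cons a A' ih =>
    have ha := hA a (by simp)
    have := ih (fun a h => hA a (by simp [h]))
    simp [PySem.List.insertBy, hx, ha, this]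

lemma pv_insertBy_one (x : Int × String) (l : List (Int × String))
    (hl : ∀ a ∈ l, a.1 = 0 ∨ a.1 = 1) (hx : x.1 = 1) :
    PySem.List.insertBy (fun a b => decide (a.1 < b.1)) x l = l ++ [x] := by
  induction l with
  | nil => simp [PySem.List.insertBy]
  | cons a l ih =>
    have ha : ¬ (x.1 < a.1) := by rcases hl a (by simp) with h | h <;> omega
    have := ih (fun a h => hl a (by simp [h]))
    simp [PySem.List.insertBy, ha, this]

lemma pv_foldl_insert_binary (l A B : List (Int × String))
    (hl : ∀ x ∈ l, x.1 = 0 ∨ x.1 = 1) (hA : ∀ a ∈ A, a.1 = 0) (hB : ∀ b ∈ B, b.1 = 1) :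
    l.foldl (fun acc x => PySem.List.insertBy (fun a b => decide (a.1 < b.1)) x acc) (A ++ B)
      = (A ++ l.filter (fun x => x.1 == 0)) ++ (B ++ l.filter (fun x => !(x.1 == 0))) := by
  induction l generalizing A B with
  | nil => simp
  | cons x l ih =>
    rcases hl x (by simp) with h0 | h1
    · rw [List.foldl_cons, pv_insertBy_zero x A B hA hB h0]
      have hstep : A ++ x :: B = (A ++ [x]) ++ B := by simp
      rw [hstep, ih (A ++ [x]) B (fun y h => hl y (by simp [h]))
            (by intro a ha; rcases List.mem_append.1 ha with h | h
                · exact hA a h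
                · simp at h; simp [h, h0]) hB]
      simp [h0]
    · rw [List.foldl_cons, pv_insertBy_one x (A ++ B)
            (by intro a ha; rcases List.mem_append.1 ha with h | h
                · exact Or.inl (hA a h)
                · exact Or.inr (hB a h)) h1]
      have hstep : (A ++ B) ++ [x] = A ++ (B ++ [x]) := by simp
      rw [hstep, ih A (B ++ [x]) (fun y h => hl y (by simp [h])) hA
            (by intro b hb; rcases List.mem_append.1 hb with h | h
                · exact hB b h
                · simp at h; simp [h, h1])]
      simp [h1]

lemma pv_sorted_binary (l : List (Int × String)) (hl : ∀ x ∈ l, x.1 = 0 ∨ x.1 = 1) :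
    PySem.List.sorted l (fun item => item.1) false
      = l.filter (fun x => x.1 == 0) ++ l.filter (fun x => !(x.1 == 0)) := by
  rw [PySem.List.sorted_eq_foldl_insertBy]
  have := pv_foldl_insert_binary l [] [] hl (by simp) (by simp)
  simpa using this

lemma pv_tag_split (zs : List (String × List String × List String)) :
    (((zs.filter (fun t => decide (t.2.1 ≠ [] ∨ t.2.2 ≠ [] ∨ t.1 ≠ ""))).map pvTag).filter
        (fun x => x.1 == 0) = (zs.filter (fun t => decide (t.2.1 ≠ [] ∨ t.2.2 ≠ []))).map pvTag)
    ∧ (((zs.filter (fun t => decide (t.2.1 ≠ [] ∨ t.2.2 ≠ [] ∨ t.1 ≠ ""))).map pvTag).filter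
        (fun x => !(x.1 == 0))
        = (zs.filter (fun t => decide (¬(t.2.1 ≠ [] ∨ t.2.2 ≠ []) ∧ t.1 ≠ ""))).map pvTag) := by
  induction zs with
  | nil => simp
  | cons t zs ih =>
    obtain ⟨ih1, ih2⟩ := ih
    by_cases hp : t.2.1 ≠ [] ∨ t.2.2 ≠ []
    · have hkeep : decide (t.2.1 ≠ [] ∨ t.2.2 ≠ [] ∨ t.1 ≠ "") = true := by
        rcases hp with h | h
        · exact decide_eq_true (Or.inl h)
        · exact decide_eq_true (Or.inr (Or.inl h))
      have hpA : decide (t.2.1 ≠ [] ∨ t.2.2 ≠ []) = true := decide_eq_true hp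
      have hFb : decide (¬(t.2.1 ≠ [] ∨ t.2.2 ≠ []) ∧ t.1 ≠ "") = false :=
        decide_eq_false (fun h => h.1 hp)
      have e0 : pvTag t = ((0 : Int), t.1) := by simp [pvTag, hp]
      constructor
      · simp only [List.filter_cons, hkeep, hpA, if_true, List.map_cons, e0]
        simpa using ih1
      · simp only [List.filter_cons, hkeep, hFb, if_true, List.map_cons, e0]
        simpa using ih2
    · have hpA : decide (t.2.1 ≠ [] ∨ t.2.2 ≠ []) = false := decide_eq_false hp
      by_cases hs : t.1 ≠ ""
      · have hkeep : decide (t.2.1 ≠ [] ∨ t.2.2 ≠ [] ∨ t.1 ≠ "") = true :=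
          decide_eq_true (Or.inr (Or.inr hs))
        have hFb : decide (¬(t.2.1 ≠ [] ∨ t.2.2 ≠ []) ∧ t.1 ≠ "") = true :=
          decide_eq_true ⟨hp, hs⟩
        have e1 : pvTag t = ((1 : Int), t.1) := by simp [pvTag, hp]
        constructor
        · simp only [List.filter_cons, hkeep, hpA, if_true, List.map_cons, e1]
          simpa using ih1
        · simp only [List.filter_cons, hkeep, hFb, if_true, List.map_cons, e1]
          simpa using ih2
      · have hkeep : decide (t.2.1 ≠ [] ∨ t.2.2 ≠ [] ∨ t.1 ≠ "") = false := by
          apply decide_eq_false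
          rintro (h | h | h)
          · exact hp (Or.inl h)
          · exact hp (Or.inr h)
          · exact hs h
        have hFb : decide (¬(t.2.1 ≠ [] ∨ t.2.2 ≠ []) ∧ t.1 ≠ "") = false :=
          decide_eq_false (fun h => hs h.2)
        constructor
        · simp only [List.filter_cons, hkeep, hpA]
          exact ih1
        · simp only [List.filter_cons, hkeep, hFb]
          exact ih2

lemma pv_slice_map {α β : Type} (f : α → β) (l : List α) (b : Int) :
    PySem.List.slice (l.map f) none (some b) = (PySem.List.slice l none (some b)).map f := by
  simp [PySem.List.slice, PySem.List.clampIdx]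

lemma pv_A_eq (sentences : List String) (sentence_characters : List (List String)) (sentence_locations : List (List String)) (limit : Int) :
    choose_summary_sentences sentences sentence_characters sentence_locations limit =
      (let P := pvPrio (sentences.zip (sentence_characters.zip sentence_locations))
       let F := pvFall (sentences.zip (sentence_characters.zip sentence_locations))
       let selected := PySem.List.slice P none (some limit)
       if (selected.length : Int) < limit then
         selected ++ PySem.List.slice F none (some (limit - (selected.length : Int)))
       else selected) := by
  unfold choose_summary_sentences
  rw [pv_loop]
  simp

lemma pv_B_eq (sentences : List String) (sentence_characters : List (List String)) (sentence_locations : List (List String)) (limit : Int) :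
    choose_summary_sentences_alt sentences sentence_characters sentence_locations limit =
      PySem.List.slice
        (pvPrio (sentences.zip (sentence_characters.zip sentence_locations))
          ++ pvFall (sentences.zip (sentence_characters.zip sentence_locations)))
        none (some limit) := by
  have hTag : (fun t : String × List String × List String =>
      ((if t.2.1 ≠ [] ∨ t.2.2 ≠ [] then (0 : Int) else 1), t.1)) = pvTag := rfl
  have hSnd : ((fun item : Int × String => item.2) ∘ pvTag)
      = fun t : String × List String × List String => t.1 := by
    funext t; rfl
  have hkeys : ∀ x ∈ ((sentences.zip (sentence_characters.zip sentence_locations)).filter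
      (fun t => decide (t.2.1 ≠ [] ∨ t.2.2 ≠ [] ∨ t.1 ≠ ""))).map pvTag, x.1 = 0 ∨ x.1 = 1 := by
    intro x hx
    simp only [List.mem_map] at hx
    obtain ⟨t, _, rfl⟩ := hx
    by_cases hp : t.2.1 ≠ [] ∨ t.2.2 ≠ [] <;> simp [pvTag, hp]
  unfold choose_summary_sentences_alt
  simp only
  rw [hTag, pv_sorted_binary _ hkeys,
    (pv_tag_split (sentences.zip (sentence_characters.zip sentence_locations))).1,
    (pv_tag_split (sentences.zip (sentence_characters.zip sentence_locations))).2,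
    ← List.map_append, pv_slice_map, List.map_map, hSnd]
  unfold pvPrio pvFall
  rw [← List.map_append, pv_slice_map]

lemma pv_merge_eq (P F : List String) (limit : Int) (hl : 0 ≤ limit) :
    (let selected := PySem.List.slice P none (some limit)
     if (selected.length : Int) < limit then
       selected ++ PySem.List.slice F none (some (limit - (selected.length : Int)))
     else selected)
      = PySem.List.slice (P ++ F) none (some limit) := by
  rw [PySem.List.slice_to _ hl]
  simp only
  rw [PySem.List.slice_to _ hl]
  by_cases hc : ((P.take limit.toNat).length : Int) < limit
  · rw [if_pos hc]
    have hlen : (P.take limit.toNat).length = min limit.toNat P.length := by simp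
    rw [PySem.List.slice_to _ (by omega), List.take_append]
    congr 2
    omega
  · rw [if_neg hc, List.take_append]
    have hlen : (P.take limit.toNat).length = min limit.toNat P.length := by simp
    have hz : limit.toNat - P.length = 0 := by omega
    simp [hz]

-- ===== VERDICT (by name: the statement is the Claim_ definition above) =====
theorem choose_summary_sentences_spec : Claim_equal_choose_summary_sentences := by
  intro sentences sentence_characters sentence_locations limit _ hpre
  rw [Spec_choose_summary_sentences, pv_A_eq, pv_B_eq]
  exact pv_merge_eq _ _ _ hpre
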